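-- pv_equiv track=rewrite | github.com/UTokyo-HayashiLab/subregular_language | eval_plot_morphology.py | subseqs_upto_m
-- ===== SOURCE A (Python) =====
-- from typing import List
--
-- def subseqs_upto_m(seq: List[str], m: int):
--     S=set()
--     n=len(seq)
--     for L in range(1, m+1):
--         def rec(start, l, pref):
--             if l==0:
--                 S.add(tuple(pref)); return
--             for i in range(start, n-l+1):
--                 pref.append(seq[i]); rec(i+1, l-1, pref); pref.pop()
--         rec(0, L, [])
--     return S
-- ===== SOURCE B (Python) =====
-- from typing import List
--
-- def subseqs_upto_m(seq: List[str], m: int):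
--     n = len(seq)
--     S = set()
--     level = [((), -1)]  # (subsequence tuple, index of its last element)
--     for _ in range(1, m + 1):
--         level = [(t + (seq[i],), i) for (t, j) in level for i in range(j + 1, n)]
--         for t, _ in level:
--             S.add(t)
--     return S
-- ===== Notes on version B (the rewrite author's own statement) =====
-- stated objective: simpler
-- what changed: Replaced the per-length DFS recursion over a shared mutable prefix with an iterative breadth-first level expansion: each level of (tuple, last-index) pairs is extended by one element via a comprehension, so there is no nested function, no recursion and no mutable prefix.
import Mathlib
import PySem

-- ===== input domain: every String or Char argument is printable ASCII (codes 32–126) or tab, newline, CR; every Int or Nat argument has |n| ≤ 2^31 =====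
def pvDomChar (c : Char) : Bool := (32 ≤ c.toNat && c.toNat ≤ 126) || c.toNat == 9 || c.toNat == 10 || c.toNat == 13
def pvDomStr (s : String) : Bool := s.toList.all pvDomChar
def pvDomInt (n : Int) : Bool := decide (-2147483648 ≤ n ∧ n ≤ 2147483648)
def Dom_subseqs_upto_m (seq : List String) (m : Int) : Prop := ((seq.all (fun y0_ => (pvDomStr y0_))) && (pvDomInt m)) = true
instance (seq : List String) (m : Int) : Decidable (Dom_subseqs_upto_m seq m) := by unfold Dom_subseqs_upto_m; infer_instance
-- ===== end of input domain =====

-- B replaces A's per-length DFS recursion over a mutable prefix with an iterative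
-- level-by-level (BFS) expansion of (tuple, last-index) pairs — simpler: no nested
-- function, no recursion, no mutable state.

-- ===== PORT A =====
-- rec(start, l, pref): the mutable pref with append/pop is passed functionally
-- (pref ++ [seq[i]] down the call, restored on return); l is the Nat recursion depth
-- (Python's l is always ≥ 0 here).
def recA (seq : List String) (n : Int) : Nat → Int → List String → PySem.Set (List String) → PySem.Set (List String)
  | 0, _, pref, S => PySem.Set.add S pref
  | l + 1, start, pref, S =>
      (PySem.List.pyRange start (n - (l + 1 : Nat) + 1) 1).foldl
        (fun S i => recA seq n l (i + 1) (pref ++ [PySem.List.pyGetD seq i ""]) S) S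

def subseqs_upto_m (seq : List String) (m : Int) : List (List String) :=
  let n : Int := seq.length
  (PySem.List.pyRange 1 (m + 1) 1).foldl (fun S L => recA seq n L.toNat 0 [] S) PySem.Set.empty

-- ===== PORT B =====
-- the comprehension building the next level from the current one
def stepB (seq : List String) (n : Int) (level : List (List String × Int)) : List (List String × Int) :=
  level.flatMap (fun tj =>
    (PySem.List.pyRange (tj.2 + 1) n 1).map (fun i => (tj.1 ++ [PySem.List.pyGetD seq i ""], i)))

def subseqs_upto_m_alt (seq : List String) (m : Int) : List (List String) :=
  let n : Int := seq.length
  ((PySem.List.pyRange 1 (m + 1) 1).foldl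
    (fun (p : PySem.Set (List String) × List (List String × Int)) _ =>
      let level := stepB seq n p.2
      (level.foldl (fun S t => PySem.Set.add S t.1) p.1, level))
    (PySem.Set.empty, [([], -1)])).1

-- ===== PRECONDITION & SPEC =====
def Spec_subseqs_upto_m (seq : List String) (m : Int) (out : List (List String)) : Prop := out = subseqs_upto_m_alt seq m
instance (seq : List String) (m : Int) (out : List (List String)) : Decidable (Spec_subseqs_upto_m seq m out) := by unfold Spec_subseqs_upto_m; infer_instance

-- ===== CLAIM (what is proved, stated in full; the proofs are below) =====
def Claim_equal_subseqs_upto_m : Prop := ∀ (seq : List String) (m : Int), Dom_subseqs_upto_m seq m → Spec_subseqs_upto_m seq m (subseqs_upto_m seq m)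

-- ===== LEMMAS AND PROOFS =====

-- The list of value-lists A's rec enumerates (DFS order, A's bounded ranges)
def F (seq : List String) (n : Int) : Nat → Int → List (List String)
  | 0, _ => [[]]
  | l + 1, s =>
      (PySem.List.pyRange s (n - (l + 1 : Nat) + 1) 1).flatMap
        (fun i => (F seq n l (i + 1)).map (fun u => PySem.List.pyGetD seq i "" :: u))

-- The (values, last-index) pairs B's levels hold, built front-first with FULL ranges
def Fp (seq : List String) (n : Int) : Nat → Int → List (List String × Int)
  | 0, j => [([], j)]
  | l + 1, j =>
      (PySem.List.pyRange (j + 1) n 1).flatMap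
        (fun i => (Fp seq n l i).map (fun p => (PySem.List.pyGetD seq i "" :: p.1, p.2)))

theorem foldl_flatMap {α β γ : Type} (xs : List α) (g : α → List β) (f : γ → β → γ) (init : γ) :
    (xs.flatMap g).foldl f init = xs.foldl (fun c a => (g a).foldl f c) init := by
  induction xs generalizing init with
  | nil => rfl
  | cons x xs ih => simp [List.flatMap_cons, List.foldl_append, ih]

-- A's rec = a fold of Set.add over the DFS list F
theorem recA_eq (seq : List String) (n : Int) (l : Nat) :
    ∀ (start : Int) (pref : List String) (S : PySem.Set (List String)),
    recA seq n l start pref S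
      = (F seq n l start).foldl (fun S u => PySem.Set.add S (pref ++ u)) S := by
  induction l with
  | zero => intro start pref S; simp [recA, F]
  | succ l ih =>
      intro start pref S
      rw [show recA seq n (l + 1) start pref S
            = (PySem.List.pyRange start (n - (l + 1 : Nat) + 1) 1).foldl
                (fun S i => recA seq n l (i + 1) (pref ++ [PySem.List.pyGetD seq i ""]) S) S from rfl,
          show F seq n (l + 1) start
            = (PySem.List.pyRange start (n - (l + 1 : Nat) + 1) 1).flatMap
                (fun i => (F seq n l (i + 1)).map (fun u => PySem.List.pyGetD seq i "" :: u)) from rfl,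
          foldl_flatMap]
      apply PySem.List.foldl_congr_mem
      intro S' i _
      rw [List.foldl_map, ih]
      apply PySem.List.foldl_congr_mem
      intro S'' u _
      simp

-- A's bounded ranges may be widened to the full range: the extra tail contributes nothing
theorem F_full_range (seq : List String) (n : Int) (l : Nat) (s : Int) :
    F seq n (l + 1) s
      = (PySem.List.pyRange s n 1).flatMap
          (fun i => (F seq n l (i + 1)).map (fun u => PySem.List.pyGetD seq i "" :: u)) := by
  cases l with
  | zero =>
      rw [show F seq n (0 + 1) s
            = (PySem.List.pyRange s (n - (0 + 1 : Nat) + 1) 1).flatMap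
                (fun i => (F seq n 0 (i + 1)).map (fun u => PySem.List.pyGetD seq i "" :: u)) from rfl,
          show (n - (0 + 1 : Nat) + 1 : Int) = n from by push_cast; ring]
  | succ l =>
      have hg : ∀ i : Int, n - (l + 1 : Nat) ≤ i →
          (F seq n (l + 1) (i + 1)).map (fun u => PySem.List.pyGetD seq i "" :: u)
            = ([] : List (List String)) := by
        intro i hi
        have hF : F seq n (l + 1) (i + 1) = [] := by
          rw [show F seq n (l + 1) (i + 1)
                = (PySem.List.pyRange (i + 1) (n - (l + 1 : Nat) + 1) 1).flatMap
                    (fun i' => (F seq n l (i' + 1)).map (fun u => PySem.List.pyGetD seq i' "" :: u)) from rfl,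
              PySem.List.pyRange_one_eq_nil (by omega)]
          rfl
        rw [hF]; rfl
      have hnn : (0 : Int) ≤ (l + 1 : Nat) := Int.natCast_nonneg _
      rw [show F seq n (l + 1 + 1) s
            = (PySem.List.pyRange s (n - (l + 1 + 1 : Nat) + 1) 1).flatMap
                (fun i => (F seq n (l + 1) (i + 1)).map (fun u => PySem.List.pyGetD seq i "" :: u)) from rfl,
          show (n - (l + 1 + 1 : Nat) + 1 : Int) = n - (l + 1 : Nat) from by push_cast; ring]
      by_cases hsl : s ≤ n - (l + 1 : Nat)
      · conv_rhs => rw [PySem.List.pyRange_one_append s (n - (l + 1 : Nat)) n hsl (by omega),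
            List.flatMap_append]
        have htail : (PySem.List.pyRange (n - (l + 1 : Nat)) n 1).flatMap
            (fun i => (F seq n (l + 1) (i + 1)).map (fun u => PySem.List.pyGetD seq i "" :: u)) = [] :=
          List.flatMap_eq_nil_iff.mpr (fun i hi => hg i (by
            rw [PySem.List.mem_pyRange_one] at hi; omega))
        rw [htail, List.append_nil]
      · have h2 : (PySem.List.pyRange s n 1).flatMap
            (fun i => (F seq n (l + 1) (i + 1)).map (fun u => PySem.List.pyGetD seq i "" :: u)) = [] :=
          List.flatMap_eq_nil_iff.mpr (fun i hi => hg i (by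
            rw [PySem.List.mem_pyRange_one] at hi; omega))
        rw [h2, PySem.List.pyRange_one_eq_nil (show (n - (l + 1 : Nat) : Int) ≤ s by omega)]
        rfl

-- one BFS step on a level described by Fp gives the next Fp level
theorem stepB_Fp (seq : List String) (n : Int) (l : Nat) :
    ∀ j : Int, stepB seq n (Fp seq n l j) = Fp seq n (l + 1) j := by
  induction l with
  | zero =>
      intro j
      simp [stepB, Fp, List.map_eq_flatMap]
  | succ l ih =>
      intro j
      rw [show Fp seq n (l + 1 + 1) j
            = (PySem.List.pyRange (j + 1) n 1).flatMap
                (fun i => (Fp seq n (l + 1) i).map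
                  (fun p => (PySem.List.pyGetD seq i "" :: p.1, p.2))) from rfl]
      conv_lhs => rw [show Fp seq n (l + 1) j
            = (PySem.List.pyRange (j + 1) n 1).flatMap
                (fun i => (Fp seq n l i).map
                  (fun p => (PySem.List.pyGetD seq i "" :: p.1, p.2))) from rfl]
      simp only [stepB, List.flatMap_assoc, List.flatMap_map]
      apply List.flatMap_congr
      intro i _
      rw [← ih i]
      simp only [stepB, List.map_flatMap, List.map_map]
      apply List.flatMap_congr
      intro p _
      simp [Function.comp]

-- the values in an Fp level are exactly A's DFS list F
theorem Fp_fst (seq : List String) (n : Int) (l : Nat) :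
    ∀ j : Int, (Fp seq n l j).map Prod.fst = F seq n l (j + 1) := by
  induction l with
  | zero => intro j; simp [Fp, F]
  | succ l ih =>
      intro j
      rw [F_full_range,
          show Fp seq n (l + 1) j
            = (PySem.List.pyRange (j + 1) n 1).flatMap
                (fun i => (Fp seq n l i).map
                  (fun p => (PySem.List.pyGetD seq i "" :: p.1, p.2))) from rfl]
      simp only [List.map_flatMap, List.map_map]
      apply List.flatMap_congr
      intro i _
      rw [← ih i, List.map_map]
      rfl

-- the two outer folds agree, with B's level pinned to Fp
theorem main_fold (seq : List String) (n : Int) (K : Nat) :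
    (List.range K).foldl
        (fun (p : PySem.Set (List String) × List (List String × Int)) (_ : Nat) =>
          let level := stepB seq n p.2
          (level.foldl (fun S t => PySem.Set.add S t.1) p.1, level))
        (PySem.Set.empty, [([], -1)])
      = ((List.range K).foldl (fun S (k : Nat) => recA seq n (k + 1) 0 [] S) PySem.Set.empty,
         Fp seq n K (-1)) := by
  induction K with
  | zero => rfl
  | succ K ih =>
      rw [List.range_succ, List.foldl_append, List.foldl_append, ih]
      simp only [List.foldl_cons, List.foldl_nil]
      rw [stepB_Fp]
      simp only [Prod.mk.injEq]
      refine ⟨?_, trivial⟩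
      rw [recA_eq]
      simp only [List.nil_append]
      rw [show F seq n (K + 1) (0 : Int) = F seq n (K + 1) ((-1 : Int) + 1) from by norm_num,
          ← Fp_fst, List.foldl_map]

theorem equal_core (seq : List String) (m : Int) :
    subseqs_upto_m seq m = subseqs_upto_m_alt seq m := by
  unfold subseqs_upto_m subseqs_upto_m_alt
  simp only [PySem.List.pyRange_one]
  rw [show (m + 1 - 1 : Int) = m from by ring, List.foldl_map, List.foldl_map]
  have h1 : (List.range m.toNat).foldl
        (fun (S : PySem.Set (List String)) (k : Nat) =>
          recA seq (seq.length : Int) ((1 : Int) + (k : Int)).toNat 0 [] S) PySem.Set.empty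
      = (List.range m.toNat).foldl
        (fun S k => recA seq (seq.length : Int) (k + 1) 0 [] S) PySem.Set.empty := by
    apply PySem.List.foldl_congr_mem
    intro acc k _
    congr 1
    omega
  rw [h1, main_fold]

-- ===== VERDICT (by name: the statement is the Claim_ definition above) =====
theorem subseqs_upto_m_spec : Claim_equal_subseqs_upto_m := by
  intro seq m _
  exact equal_core seq m
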